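-- pv_equiv track=rewrite | github.com/MrBrantCode/unitest_baseline | mut_generate/mist_train_taco/taco_7421/solution.py | calculate_max_happiness
-- ===== SOURCE A (Python) =====
-- def calculate_max_happiness(N, S, contestants):
--     def cns(ts, s):
--         if ts % s == 0:
--             return ts
--         else:
--             return (ts // s + 1) * s
--
--     tsr = sum(si for si, _, _ in contestants)
--     da = [[] for _ in range(100005)]
--     db = [[] for _ in range(100005)]
--
--     for i, (si, ai, bi) in enumerate(contestants):
--         if ai > bi:
--             da[ai - bi].append(i)
--         else:
--             db[bi - ai].append(i)
--
--     tsa = cns(tsr, S)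
--
--     def calculate_happiness(da, db):
--         a = 0
--         c1 = 0
--         for i in range(100000, -1, -1):
--             for j in da[i]:
--                 a += contestants[j][0] * contestants[j][1]
--                 c1 += contestants[j][0]
--
--         c1r = cns(c1, S) - c1
--         c2r = tsa - cns(c1, S)
--
--         for i in range(100000, -1, -1):
--             for j in db[i]:
--                 if contestants[j][0] > c2r:
--                     a += c2r * contestants[j][2]
--                     a += (contestants[j][0] - c2r) * contestants[j][1]
--                     c2r = 0
--                 else:
--                     a += contestants[j][0] * contestants[j][2]
--                     c2r -= contestants[j][0]
--
--         return a
--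
--     a1 = calculate_happiness(da, db)
--     a2 = calculate_happiness(db, da)
--
--     return max(a1, a2)
-- ===== SOURCE B (Python) =====
-- def calculate_max_happiness(N, S, contestants):
--     def cns(ts, s):
--         r = ts % s
--         return ts if r == 0 else ts + (s - r)
--
--     total = sum(s for s, _, _ in contestants)
--     target = cns(total, S)
--
--     pos = [c for c in contestants if c[1] > c[2]]
--     nonpos = [c for c in contestants if c[1] <= c[2]]
--     # difference descending; stable sort keeps original (index) order on ties
--     pos_sorted = sorted(pos, key=lambda c: c[2] - c[1])
--     nonpos_sorted = sorted(nonpos, key=lambda c: c[1] - c[2])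
--
--     def happiness(sum_group, greedy_group):
--         a = sum(s * ai for s, ai, _ in sum_group)
--         c1 = sum(s for s, _, _ in sum_group)
--         c2r = target - cns(c1, S)
--         for s, ai, bi in greedy_group:
--             if s > c2r:
--                 a += c2r * bi + (s - c2r) * ai
--                 c2r = 0
--             else:
--                 a += s * bi
--                 c2r -= s
--         return a
--
--     return max(happiness(pos_sorted, nonpos_sorted), happiness(nonpos_sorted, pos_sorted))
-- ===== Notes on version B (the rewrite author's own statement) =====
-- stated objective: faster
-- what changed: Replaces the two fixed 100005-slot bucket arrays and the four scans of all 100001 difference values by partitioning the contestants into the ai>bi and ai<=bi groups and stably sorting each by difference descending, then running the same two-phase greedy on the sorted lists.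
-- outside the precondition, e.g. on calculate_max_happiness(1, 0, [(1, 5, 2)]): A raises ZeroDivisionError, B raises ZeroDivisionError; on calculate_max_happiness(1, 1, [(1, 100002, 1)]): A returns 0, B returns 100002; on calculate_max_happiness(1, 1, [(1, 200000, 0)]): A raises IndexError, B returns 200000
import Mathlib
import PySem

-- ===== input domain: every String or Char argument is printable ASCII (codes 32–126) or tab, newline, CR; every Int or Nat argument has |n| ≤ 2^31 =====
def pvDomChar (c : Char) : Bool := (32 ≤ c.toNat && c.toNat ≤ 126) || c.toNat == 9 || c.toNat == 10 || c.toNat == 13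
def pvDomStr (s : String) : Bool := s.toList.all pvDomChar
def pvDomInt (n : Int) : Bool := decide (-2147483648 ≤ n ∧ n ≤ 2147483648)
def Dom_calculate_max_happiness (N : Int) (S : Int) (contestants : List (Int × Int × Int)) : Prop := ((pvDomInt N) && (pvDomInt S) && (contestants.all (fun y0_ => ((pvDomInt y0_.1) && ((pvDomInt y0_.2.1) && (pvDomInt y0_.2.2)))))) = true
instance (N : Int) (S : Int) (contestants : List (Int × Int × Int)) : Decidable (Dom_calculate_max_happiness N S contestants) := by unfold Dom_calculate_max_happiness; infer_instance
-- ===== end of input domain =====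

-- B replaces A's two fixed 100005-slot bucket tables and their full 100001-index scans by
-- partitioning the contestants and stably sorting each part by difference descending (objective: faster,
-- as measured on the generated inputs: A always pays the 100001-step scans).

-- ===== PORT A =====
-- the helper cns(ts, s) (textually identical in A and B; shared by both ports)
def cns (ts s : Int) : Int :=
  if PySem.Int.mod ts s == 0 then ts else (PySem.Int.floordiv ts s + 1) * s

-- the two length-100005 bucket tables da/db, ported as diff → bucket maps (indexing and
-- append-at-index are exact on the in-range indices Pre_ admits)
def bucketsA (contestants : List (Int × Int × Int)) :
    PySem.Dict Int (List Int) × PySem.Dict Int (List Int) :=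
  (PySem.List.enumerate contestants).foldl
    (fun st p =>
      if p.2.2.1 > p.2.2.2 then
        (st.1.modify (p.2.2.1 - p.2.2.2) [] (· ++ [p.1]), st.2)
      else
        (st.1, st.2.modify (p.2.2.2 - p.2.2.1) [] (· ++ [p.1])))
    (PySem.Dict.empty, PySem.Dict.empty)

-- the inner helper calculate_happiness(da, db)
def happinessA (contestants : List (Int × Int × Int)) (tsa S : Int)
    (dx dy : PySem.Dict Int (List Int)) : Int :=
  let ac := (PySem.List.pyRange 100000 (-1) (-1)).foldl
    (fun (ac : Int × Int) i =>
      (dx.getD i []).foldl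
        (fun (ac : Int × Int) j =>
          let c := PySem.List.pyGetD contestants j (0, 0, 0)
          (ac.1 + c.1 * c.2.1, ac.2 + c.1)) ac)
    (0, 0)
  let _c1r := cns ac.2 S - ac.2   -- Python computes c1r and never uses it
  let st := (PySem.List.pyRange 100000 (-1) (-1)).foldl
    (fun (st : Int × Int) i =>
      (dy.getD i []).foldl
        (fun (st : Int × Int) j =>
          let c := PySem.List.pyGetD contestants j (0, 0, 0)
          if c.1 > st.2 then
            (st.1 + st.2 * c.2.2 + (c.1 - st.2) * c.2.1, 0)
          else
            (st.1 + c.1 * c.2.2, st.2 - c.1)) st)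
    (ac.1, tsa - cns ac.2 S)
  st.1

def calculate_max_happiness (N : Int) (S : Int) (contestants : List (Int × Int × Int)) : Int :=
  let tsr := (contestants.map (fun c => c.1)).sum
  let bs := bucketsA contestants
  let tsa := cns tsr S
  max (happinessA contestants tsa S bs.1 bs.2) (happinessA contestants tsa S bs.2 bs.1)

-- ===== PORT B =====
-- B's cns(ts, s): remainder form of the same rounding
def cnsUp (ts s : Int) : Int :=
  let r := PySem.Int.mod ts s
  if r == 0 then ts else ts + (s - r)

-- happiness(sum_group, greedy_group)
def happinessB (S target : Int) (sg gg : List (Int × Int × Int)) : Int :=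
  let a0 := (sg.map (fun c => c.1 * c.2.1)).sum
  let c1 := (sg.map (fun c => c.1)).sum
  let st := gg.foldl
    (fun (st : Int × Int) c =>
      if c.1 > st.2 then
        (st.1 + st.2 * c.2.2 + (c.1 - st.2) * c.2.1, 0)
      else
        (st.1 + c.1 * c.2.2, st.2 - c.1))
    (a0, target - cnsUp c1 S)
  st.1

def calculate_max_happiness_alt (N : Int) (S : Int) (contestants : List (Int × Int × Int)) : Int :=
  let total := (contestants.map (fun c => c.1)).sum
  let target := cnsUp total S
  let posS := PySem.List.sorted (contestants.filter (fun c => decide (c.2.1 > c.2.2)))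
    (fun c => c.2.2 - c.2.1)
  let nonposS := PySem.List.sorted (contestants.filter (fun c => decide (c.2.1 ≤ c.2.2)))
    (fun c => c.2.1 - c.2.2)
  max (happinessB S target posS nonposS) (happinessB S target nonposS posS)

-- ===== PRECONDITION & SPEC =====
-- Pre_ restricts to the problem domain A's fixed-size tables are built for: S ≠ 0 (S = 0 raises
-- ZeroDivisionError in cns) and every contestant with |ai-bi| ≤ 100000 — that bound is what A's
-- length-100005 bucket tables and 100000-to-0 scans assume; beyond it A raises IndexError
-- (|ai-bi| > 100004) or its scan never reaches the bucket and the contestant is silently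
-- ignored (100000 < |ai-bi| ≤ 100004), a table artefact B does not reproduce (see cites).
def Pre_calculate_max_happiness (N : Int) (S : Int) (contestants : List (Int × Int × Int)) : Prop :=
  S ≠ 0 ∧ ∀ c ∈ contestants, c.2.1 - c.2.2 ≤ 100000 ∧ c.2.2 - c.2.1 ≤ 100000
instance (N : Int) (S : Int) (contestants : List (Int × Int × Int)) :
    Decidable (Pre_calculate_max_happiness N S contestants) := by
  unfold Pre_calculate_max_happiness; infer_instance

def pvWitness_calculate_max_happiness : Int × Int × (List (Int × Int × Int)) :=
  (2, 3, [(4, 7, 2), (5, 1, 6), (2, 3, 3)])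

def Spec_calculate_max_happiness (N : Int) (S : Int) (contestants : List (Int × Int × Int)) (out : Int) : Prop :=
  out = calculate_max_happiness_alt N S contestants
instance (N : Int) (S : Int) (contestants : List (Int × Int × Int)) (out : Int) :
    Decidable (Spec_calculate_max_happiness N S contestants out) := by
  unfold Spec_calculate_max_happiness; infer_instance

-- ===== CLAIM (what is proved, stated in full; the proofs are below) =====
def Claim_equal_calculate_max_happiness : Prop := ∀ (N : Int) (S : Int) (contestants : List (Int × Int × Int)), Dom_calculate_max_happiness N S contestants → Pre_calculate_max_happiness N S contestants → Spec_calculate_max_happiness N S contestants (calculate_max_happiness N S contestants)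

-- ===== LEMMAS AND PROOFS =====

theorem cnsUp_eq_cns : cnsUp = cns := by
  funext ts s
  unfold cns cnsUp
  have h : s * PySem.Int.floordiv ts s + PySem.Int.mod ts s = ts := Int.fdiv_add_fmod ts s
  by_cases hr : PySem.Int.mod ts s = 0 <;> simp [hr]
  have h2 : (PySem.Int.floordiv ts s + 1) * s = s * PySem.Int.floordiv ts s + s := by ring
  rw [h2]
  omega

-- insertBy equation
theorem insertBy_cons' {α : Type} (before : α → α → Bool) (x y : α) (ys : List α) :
    PySem.List.insertBy before x (y :: ys) =
      if before x y then x :: y :: ys else y :: PySem.List.insertBy before x ys := rfl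

theorem insertBy_append_left {α : Type} (before : α → α → Bool) (x : α) (l1 l2 : List α)
    (h : ∀ y ∈ l1, before x y = false) :
    PySem.List.insertBy before x (l1 ++ l2) = l1 ++ PySem.List.insertBy before x l2 := by
  induction l1 with
  | nil => simp
  | cons y t ih =>
    simp only [List.cons_append, insertBy_cons', h y (by simp)]
    simp only [Bool.false_eq_true, if_false, List.cons_append, List.cons_inj_right]
    exact ih (fun z hz => h z (by simp [hz]))

theorem insertBy_all_true {α : Type} (before : α → α → Bool) (x : α) (l : List α)
    (h : ∀ y ∈ l, before x y = true) :
    PySem.List.insertBy before x l = x :: l := by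
  cases l with
  | nil => rfl
  | cons y t => simp [insertBy_cons', h y (by simp)]

def gconcat {α : Type} (key : α → Int) (ks : List Int) (xs : List α) : List α :=
  ks.flatMap (fun k => xs.filter (fun x => key x == k))

theorem gconcat_snoc_not_mem {α : Type} (key : α → Int) (x : α) (ks : List Int) (xs : List α)
    (h : ∀ k ∈ ks, key x ≠ k) :
    gconcat key ks (xs ++ [x]) = gconcat key ks xs := by
  unfold gconcat
  refine List.flatMap_congr (fun k hk => ?_)
  simp [List.filter_append, beq_eq_false_iff_ne.mpr (h k hk)]

theorem insertBy_gconcat {α : Type} (key : α → Int) (x : α) :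
    ∀ (ks : List Int), ks.Pairwise (· < ·) → key x ∈ ks → ∀ xs : List α,
      PySem.List.insertBy (fun a b => decide (key a < key b)) x (gconcat key ks xs) =
        gconcat key ks (xs ++ [x]) := by
  intro ks
  induction ks with
  | nil => intro _ h; exact absurd h (by simp)
  | cons k t ih =>
    intro hpw hmem xs
    have hk : ∀ k' ∈ t, k < k' := (List.pairwise_cons.mp hpw).1
    have ht : t.Pairwise (· < ·) := (List.pairwise_cons.mp hpw).2
    have hblock : ∀ y ∈ xs.filter (fun y => key y == k), (decide (key x < key y)) = false := by
      intro y hy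
      have : key y = k := by simpa using (List.mem_filter.mp hy).2
      by_cases hx : key x = k
      · simp [this, hx]
      · have hlt : k < key x := hk _ (by rcases List.mem_cons.mp hmem with h | h; exact absurd h hx; exact h)
        rw [this]; simp; omega
    have hsplit : gconcat key (k :: t) xs = xs.filter (fun y => key y == k) ++ gconcat key t xs := by
      simp [gconcat]
    rw [hsplit, insertBy_append_left _ _ _ _ hblock]
    by_cases hx : key x = k
    · have hrest : ∀ y ∈ gconcat key t xs, (decide (key x < key y)) = true := by
        intro y hy
        unfold gconcat at hy
        rcases List.mem_flatMap.mp hy with ⟨k', hk', hy'⟩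
        have hky : key y = k' := by simpa using (List.mem_filter.mp hy').2
        have := hk k' hk'
        simp [hky, hx]; omega
      rw [insertBy_all_true _ _ _ hrest]
      have hne : ∀ k' ∈ t, key x ≠ k' := by intro k' hk'; have := hk k' hk'; omega
      have : gconcat key (k :: t) (xs ++ [x]) =
          (xs.filter (fun y => key y == k) ++ [x]) ++ gconcat key t xs := by
        simp only [gconcat, List.flatMap_cons]
        rw [show (List.flatMap (fun k => List.filter (fun x => key x == k) (xs ++ [x])) t) = gconcat key t (xs ++ [x]) from rfl,
          gconcat_snoc_not_mem key x t xs hne]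
        simp [List.filter_append, hx, gconcat]
      rw [this]; simp [gconcat]
    · have hx' : key x ∈ t := by rcases List.mem_cons.mp hmem with h | h; exact absurd h hx; exact h
      rw [ih ht hx' xs]
      have : gconcat key (k :: t) (xs ++ [x]) =
          xs.filter (fun y => key y == k) ++ gconcat key t (xs ++ [x]) := by
        simp only [gconcat, List.flatMap_cons]
        simp [List.filter_append, beq_eq_false_iff_ne.mpr hx]
      rw [this]

theorem sorted_eq_gconcat {α : Type} (key : α → Int) (ks : List Int)
    (hpw : ks.Pairwise (· < ·)) :
    ∀ xs : List α, (∀ x ∈ xs, key x ∈ ks) →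
      PySem.List.sorted xs key = gconcat key ks xs := by
  intro xs
  induction xs using List.reverseRecOn with
  | nil => intro _; simp [PySem.List.sorted_eq_foldl_insertBy, gconcat]
  | append_singleton xs x ih =>
    intro hcov
    rw [PySem.List.sorted_eq_foldl_insertBy, List.foldl_append]
    simp only [List.foldl_cons, List.foldl_nil]
    rw [← PySem.List.sorted_eq_foldl_insertBy, ih (fun y hy => hcov y (by simp [hy]))]
    exact insertBy_gconcat key x ks hpw (hcov x (by simp)) xs

theorem foldl_foldl_flatMap {α β ι : Type} (ks : List ι) (g : ι → List α) (f : β → α → β) (init : β) :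
    ks.foldl (fun st i => (g i).foldl f st) init = (ks.flatMap g).foldl f init := by
  induction ks generalizing init with
  | nil => rfl
  | cons k t ih => simp [List.flatMap_cons, List.foldl_append, ih]

theorem bucketsA_eq (cs : List (Int × Int × Int)) :
    bucketsA cs =
      (((PySem.List.enumerate cs).filter (fun p => decide (p.2.2.1 > p.2.2.2))).foldl
          (fun d p => d.modify (p.2.2.1 - p.2.2.2) [] (· ++ [p.1])) PySem.Dict.empty,
       ((PySem.List.enumerate cs).filter (fun p => !decide (p.2.2.1 > p.2.2.2))).foldl
          (fun d p => d.modify (p.2.2.2 - p.2.2.1) [] (· ++ [p.1])) PySem.Dict.empty) := by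
  unfold bucketsA
  rw [show (fun (st : PySem.Dict Int (List Int) × PySem.Dict Int (List Int))
      (p : Int × (Int × Int × Int)) =>
      if p.2.2.1 > p.2.2.2 then
        (st.1.modify (p.2.2.1 - p.2.2.2) [] (· ++ [p.1]), st.2)
      else
        (st.1, st.2.modify (p.2.2.2 - p.2.2.1) [] (· ++ [p.1]))) =
      (fun st p =>
        ((fun d (p : Int × (Int × Int × Int)) =>
            if decide (p.2.2.1 > p.2.2.2) then d.modify (p.2.2.1 - p.2.2.2) [] (· ++ [p.1]) else d) st.1 p,
         (fun d (p : Int × (Int × Int × Int)) =>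
            if !decide (p.2.2.1 > p.2.2.2) then d.modify (p.2.2.2 - p.2.2.1) [] (· ++ [p.1]) else d) st.2 p))
      from by funext st p; by_cases h : p.2.2.1 > p.2.2.2 <;> simp [h]]
  refine (PySem.List.foldl_prod_mk
    (fun d (p : Int × (Int × Int × Int)) =>
      if decide (p.2.2.1 > p.2.2.2) then d.modify (p.2.2.1 - p.2.2.2) [] (· ++ [p.1]) else d)
    (fun d (p : Int × (Int × Int × Int)) =>
      if !decide (p.2.2.1 > p.2.2.2) then d.modify (p.2.2.2 - p.2.2.1) [] (· ++ [p.1]) else d)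
    (PySem.List.enumerate cs) PySem.Dict.empty PySem.Dict.empty).trans ?_
  rw [PySem.List.foldl_if_eq_foldl_filter, PySem.List.foldl_if_eq_foldl_filter]

theorem getD_foldl_modify_key {κ β γ : Type} [BEq κ] [LawfulBEq κ] (l : List γ)
    (k : γ → κ) (v : γ → β) (c : κ) :
    (l.foldl (fun d p => d.modify (k p) [] (· ++ [v p])) PySem.Dict.empty).getD c [] =
      ((l.filter (fun p => k p == c)).map v) := by
  have h := PySem.Dict.getD_foldl_modify_append (l.map (fun p => (k p, v p))) PySem.Dict.empty c
  rw [List.foldl_map] at h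
  refine Eq.trans rfl (h.trans ?_)
  simp [List.filter_map, Function.comp_def]

theorem bucketsA_fst (cs : List (Int × Int × Int)) (i : Int) :
    (bucketsA cs).1.getD i [] =
      ((PySem.List.enumerate cs).filter
        (fun p => decide (p.2.2.1 > p.2.2.2) && (p.2.2.1 - p.2.2.2 == i))).map (·.1) := by
  rw [bucketsA_eq]
  rw [show ((((PySem.List.enumerate cs).filter (fun p => decide (p.2.2.1 > p.2.2.2))).foldl
      (fun d p => d.modify (p.2.2.1 - p.2.2.2) [] (· ++ [p.1])) PySem.Dict.empty,
      (((PySem.List.enumerate cs).filter (fun p => !decide (p.2.2.1 > p.2.2.2))).foldl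
      (fun d p => d.modify (p.2.2.2 - p.2.2.1) [] (· ++ [p.1])) PySem.Dict.empty)) : _ × _).1 =
      (((PySem.List.enumerate cs).filter (fun p => decide (p.2.2.1 > p.2.2.2))).foldl
      (fun d p => d.modify (p.2.2.1 - p.2.2.2) [] (· ++ [p.1])) PySem.Dict.empty) from rfl]
  rw [getD_foldl_modify_key]
  rw [List.filter_filter]
  exact congrArg (List.map Prod.fst) (List.filter_congr fun p _ => Bool.and_comm _ _)

theorem bucketsA_snd (cs : List (Int × Int × Int)) (i : Int) :
    (bucketsA cs).2.getD i [] =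
      ((PySem.List.enumerate cs).filter
        (fun p => !decide (p.2.2.1 > p.2.2.2) && (p.2.2.2 - p.2.2.1 == i))).map (·.1) := by
  rw [bucketsA_eq]
  rw [show (Prod.snd (α := PySem.Dict Int (List Int)) ((((PySem.List.enumerate cs).filter (fun p => decide (p.2.2.1 > p.2.2.2))).foldl
      (fun d p => d.modify (p.2.2.1 - p.2.2.2) [] (· ++ [p.1])) PySem.Dict.empty),
      (((PySem.List.enumerate cs).filter (fun p => !decide (p.2.2.1 > p.2.2.2))).foldl
      (fun d p => d.modify (p.2.2.2 - p.2.2.1) [] (· ++ [p.1])) PySem.Dict.empty))) =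
      (((PySem.List.enumerate cs).filter (fun p => !decide (p.2.2.1 > p.2.2.2))).foldl
      (fun d p => d.modify (p.2.2.2 - p.2.2.1) [] (· ++ [p.1])) PySem.Dict.empty) from rfl]
  rw [getD_foldl_modify_key]
  rw [List.filter_filter]
  exact congrArg (List.map Prod.fst) (List.filter_congr fun p _ => Bool.and_comm _ _)

theorem map_snd_filter_enumerate {α : Type} (q : α → Bool) (cs : List α) :
    ∀ s : Int, ((PySem.List.enumerate cs s).filter (fun p => q p.2)).map (·.2) = cs.filter q := by
  induction cs with
  | nil => intro s; simp [PySem.List.enumerate_nil]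
  | cons x t ih =>
    intro s
    rw [PySem.List.enumerate_cons]
    by_cases h : q x <;> simp [List.filter_cons, h, ih (s + 1)]

theorem map_get_filter_enumerate (q : Int × Int × Int → Bool) (cs : List (Int × Int × Int)) :
    ((PySem.List.enumerate cs).filter (fun p => q p.2)).map
        (fun p => PySem.List.pyGetD cs p.1 (0, 0, 0)) = cs.filter q := by
  rw [List.map_congr_left (g := (·.2)) ?h]
  · exact map_snd_filter_enumerate q cs 0
  · intro p hp
    have hp' := List.mem_filter.mp hp |>.1
    rcases (PySem.List.mem_enumerate_iff cs 0 p).mp hp' with ⟨k, hk, rfl⟩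
    simp [PySem.List.pyGetD_natCast, List.getD_eq_getElem?_getD, hk]

-- the descending bucket scan visits exactly the stably sorted group
theorem flat_buckets_fst (cs : List (Int × Int × Int))
    (h : ∀ c ∈ cs, c.2.1 - c.2.2 ≤ 100000) :
    (PySem.List.pyRange 100000 (-1) (-1)).flatMap
        (fun i => ((bucketsA cs).1.getD i []).map (fun j => PySem.List.pyGetD cs j (0, 0, 0))) =
      PySem.List.sorted (cs.filter (fun c => decide (c.2.1 > c.2.2))) (fun c => c.2.2 - c.2.1) := by
  have hbucket : ∀ i : Int,
      ((bucketsA cs).1.getD i []).map (fun j => PySem.List.pyGetD cs j (0, 0, 0)) =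
        (cs.filter (fun c => decide (c.2.1 > c.2.2))).filter (fun c => c.2.2 - c.2.1 == -i) := by
    intro i
    rw [bucketsA_fst, List.map_map]
    refine Eq.trans (map_get_filter_enumerate
      (fun c => decide (c.2.1 > c.2.2) && (c.2.1 - c.2.2 == i)) cs) ?_
    rw [List.filter_filter]
    exact List.filter_congr fun c _ => by
      rw [Bool.eq_iff_iff]
      simp only [Bool.and_eq_true, beq_iff_eq, decide_eq_true_eq]
      omega
  rw [List.flatMap_congr (fun i _ => hbucket i)]
  rw [sorted_eq_gconcat (fun c : Int × Int × Int => c.2.2 - c.2.1)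
    ((PySem.List.pyRange 100000 (-1) (-1)).map (fun i => -i)) ?pw
    (cs.filter (fun c => decide (c.2.1 > c.2.2))) ?cov]
  · simp only [gconcat, List.flatMap_map]
  case pw =>
    rw [PySem.List.pyRange_neg_one, List.map_map]
    refine List.Pairwise.map _ (fun a b hab => ?_) (List.pairwise_lt_range (n := (100000 - (-1) : Int).toNat))
    simp only [Function.comp]
    omega
  case cov =>
    intro x hx
    have hmem := List.mem_filter.mp hx
    have hgt : x.2.1 > x.2.2 := by simpa using hmem.2
    have hle := h x hmem.1
    refine List.mem_map.mpr ⟨x.2.1 - x.2.2, ?_, by dsimp only; omega⟩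
    rw [PySem.List.mem_pyRange_neg_one]
    omega

theorem flat_buckets_snd (cs : List (Int × Int × Int))
    (h : ∀ c ∈ cs, c.2.2 - c.2.1 ≤ 100000) :
    (PySem.List.pyRange 100000 (-1) (-1)).flatMap
        (fun i => ((bucketsA cs).2.getD i []).map (fun j => PySem.List.pyGetD cs j (0, 0, 0))) =
      PySem.List.sorted (cs.filter (fun c => decide (c.2.1 ≤ c.2.2))) (fun c => c.2.1 - c.2.2) := by
  have hbucket : ∀ i : Int,
      ((bucketsA cs).2.getD i []).map (fun j => PySem.List.pyGetD cs j (0, 0, 0)) =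
        (cs.filter (fun c => decide (c.2.1 ≤ c.2.2))).filter (fun c => c.2.1 - c.2.2 == -i) := by
    intro i
    rw [bucketsA_snd, List.map_map]
    refine Eq.trans (map_get_filter_enumerate
      (fun c => !decide (c.2.1 > c.2.2) && (c.2.2 - c.2.1 == i)) cs) ?_
    rw [List.filter_filter]
    exact List.filter_congr fun c _ => by
      rw [Bool.eq_iff_iff]
      simp only [Bool.and_eq_true, beq_iff_eq, decide_eq_true_eq,
        Bool.not_eq_eq_eq_not, Bool.not_true, decide_eq_false_iff_not]
      omega
  rw [List.flatMap_congr (fun i _ => hbucket i)]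
  rw [sorted_eq_gconcat (fun c : Int × Int × Int => c.2.1 - c.2.2)
    ((PySem.List.pyRange 100000 (-1) (-1)).map (fun i => -i)) ?pw
    (cs.filter (fun c => decide (c.2.1 ≤ c.2.2))) ?cov]
  · simp only [gconcat, List.flatMap_map]
  case pw =>
    rw [PySem.List.pyRange_neg_one, List.map_map]
    refine List.Pairwise.map _ (fun a b hab => ?_) (List.pairwise_lt_range (n := (100000 - (-1) : Int).toNat))
    simp only [Function.comp]
    omega
  case cov =>
    intro x hx
    have hmem := List.mem_filter.mp hx
    have hle0 : x.2.1 ≤ x.2.2 := by simpa using hmem.2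
    have hle := h x hmem.1
    refine List.mem_map.mpr ⟨x.2.2 - x.2.1, ?_, by dsimp only; omega⟩
    rw [PySem.List.mem_pyRange_neg_one]
    omega


theorem happiness_bridge (cs : List (Int × Int × Int)) (tsa S : Int)
    (dx dy : PySem.Dict Int (List Int)) (sg gg : List (Int × Int × Int))
    (hx : (PySem.List.pyRange 100000 (-1) (-1)).flatMap
        (fun i => (dx.getD i []).map (fun j => PySem.List.pyGetD cs j (0, 0, 0))) = sg)
    (hy : (PySem.List.pyRange 100000 (-1) (-1)).flatMap
        (fun i => (dy.getD i []).map (fun j => PySem.List.pyGetD cs j (0, 0, 0))) = gg) :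
    happinessA cs tsa S dx dy = happinessB S tsa sg gg := by
  have hx' : ((PySem.List.pyRange 100000 (-1) (-1)).flatMap (fun i => dx.getD i [])).map
      (fun j => PySem.List.pyGetD cs j (0, 0, 0)) = sg := by
    rw [List.map_flatMap]; exact hx
  have hy' : ((PySem.List.pyRange 100000 (-1) (-1)).flatMap (fun i => dy.getD i [])).map
      (fun j => PySem.List.pyGetD cs j (0, 0, 0)) = gg := by
    rw [List.map_flatMap]; exact hy
  simp only [happinessA, happinessB]
  rw [foldl_foldl_flatMap, foldl_foldl_flatMap]
  have e1 : List.foldl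
      (fun (ac : Int × Int) j =>
        (ac.1 + (PySem.List.pyGetD cs j (0, 0, 0)).1 * (PySem.List.pyGetD cs j (0, 0, 0)).2.1,
          ac.2 + (PySem.List.pyGetD cs j (0, 0, 0)).1))
      (0, 0) (List.flatMap (fun i => dx.getD i []) (PySem.List.pyRange 100000 (-1) (-1))) =
      ((sg.map (fun c => c.1 * c.2.1)).sum, (sg.map (fun c => c.1)).sum) := by
    rw [← hx']
    refine Eq.trans
      ((List.foldl_map (f := fun j => PySem.List.pyGetD cs j (0, 0, 0))
        (g := fun (ac : Int × Int) (c : Int × Int × Int) => (ac.1 + c.1 * c.2.1, ac.2 + c.1))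
        (l := List.flatMap (fun i => dx.getD i []) (PySem.List.pyRange 100000 (-1) (-1)))
        (init := (0, 0))).symm) ?_
    refine Eq.trans (PySem.List.foldl_prod_mk
      (fun (a : Int) (c : Int × Int × Int) => a + c.1 * c.2.1)
      (fun (a : Int) (c : Int × Int × Int) => a + c.1) _ 0 0) ?_
    simp [PySem.List.foldl_add]
  rw [e1]
  have e3 : ∀ init : Int × Int, List.foldl
      (fun (st : Int × Int) j =>
        if (PySem.List.pyGetD cs j (0, 0, 0)).1 > st.2 then
          (st.1 + st.2 * (PySem.List.pyGetD cs j (0, 0, 0)).2.2 +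
              ((PySem.List.pyGetD cs j (0, 0, 0)).1 - st.2) * (PySem.List.pyGetD cs j (0, 0, 0)).2.1,
            0)
        else
          (st.1 + (PySem.List.pyGetD cs j (0, 0, 0)).1 * (PySem.List.pyGetD cs j (0, 0, 0)).2.2,
            st.2 - (PySem.List.pyGetD cs j (0, 0, 0)).1))
      init (List.flatMap (fun i => dy.getD i []) (PySem.List.pyRange 100000 (-1) (-1))) =
      List.foldl
        (fun (st : Int × Int) (c : Int × Int × Int) =>
          if c.1 > st.2 then (st.1 + st.2 * c.2.2 + (c.1 - st.2) * c.2.1, 0)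
          else (st.1 + c.1 * c.2.2, st.2 - c.1)) init gg := by
    intro init
    rw [← hy']
    exact (List.foldl_map (f := fun j => PySem.List.pyGetD cs j (0, 0, 0))
      (g := fun (st : Int × Int) (c : Int × Int × Int) =>
        if c.1 > st.2 then (st.1 + st.2 * c.2.2 + (c.1 - st.2) * c.2.1, 0)
        else (st.1 + c.1 * c.2.2, st.2 - c.1))
      (l := List.flatMap (fun i => dy.getD i []) (PySem.List.pyRange 100000 (-1) (-1)))
      (init := init)).symm
  rw [e3, cnsUp_eq_cns]

theorem calculate_max_happiness_main : ∀ (N S : Int) (contestants : List (Int × Int × Int)),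
    Pre_calculate_max_happiness N S contestants →
    calculate_max_happiness N S contestants = calculate_max_happiness_alt N S contestants := by
  intro N S cs hPre
  have hsmall : ∀ c ∈ cs, c.2.1 - c.2.2 ≤ 100000 ∧ c.2.2 - c.2.1 ≤ 100000 := hPre.2
  simp only [calculate_max_happiness, calculate_max_happiness_alt]
  rw [happiness_bridge cs _ _ _ _ _ _
      (flat_buckets_fst cs (fun c hc => (hsmall c hc).1))
      (flat_buckets_snd cs (fun c hc => (hsmall c hc).2)),
    happiness_bridge cs _ _ _ _ _ _
      (flat_buckets_snd cs (fun c hc => (hsmall c hc).2))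
      (flat_buckets_fst cs (fun c hc => (hsmall c hc).1))]
  rw [← cnsUp_eq_cns]

-- ===== VERDICT (by name: the statement is the Claim_ definition above) =====
theorem calculate_max_happiness_spec : Claim_equal_calculate_max_happiness := by
  intro N S contestants _hDom hPre
  exact calculate_max_happiness_main N S contestants hPre
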